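-- pv_equiv track=rewrite | github.com/Ben10164/CPSC322 | PAs/pa1-Ben10164/pa1.py | most_streaming_service
-- ===== SOURCE A (Python) =====
-- def remove_missing_values(table, header, col_name):
--     """Makes a new table that is a copy of the table parameter (without modifying the original
--     table), but with rows removed from the table that have missing values in the column with
--     label col_name
--     Args:
--         table (list of list): Data in 2D table format
--         header (list of str): Column names corresponding to the table (in the same order)
--         col_name (str): Represents the name of the column to check for missing values
--     Returns:
--         list of list: The new table with removed rows
--     """
--     new_table = []
--     for row in table:
--         if row[header.index(col_name)] != "": # Checks to see if the value is empty at the index of col_name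
--             new_table.append(row)
--     return new_table
--
-- def most_streaming_service(table,headers):
--     """Returns the name of the streaming service that hosts the most TV shows
--     Args:
--         table (list of list): Data in 2D table format
--         header (list of str): Column names corresponding to the table (in the same order)
--     Returns:
--         str: The name of the streaming service that hosts the most TV shows
--     """
--     temp_data = remove_missing_values(table,headers,"Netflix")
--     temp_data = remove_missing_values(temp_data,headers,"Hulu")
--     temp_data = remove_missing_values(temp_data,headers,"Prime Video")
--     temp_data = remove_missing_values(temp_data,headers,"Disney+")
--
--     total_netflix = 0
--     total_hulu = 0
--     total_prime = 0
--     total_disney = 0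
--
--     for row in temp_data:
--         if row[headers.index("Netflix")] == "1":
--             total_netflix += 1
--         if row[headers.index("Hulu")] == "1":
--             total_hulu += 1
--         if row[headers.index("Prime Video")] == "1":
--             total_prime += 1
--         if row[headers.index("Disney+")] == "1":
--             total_disney += 1
--
--     if max(total_netflix,total_hulu,total_prime,total_disney) == total_netflix:
--         return "Netflix"
--     elif max(total_netflix,total_hulu,total_prime,total_disney) == total_hulu:
--         return "Hulu"
--     elif max(total_netflix,total_hulu,total_prime,total_disney) == total_prime:
--         return "Prime Video"
--     else:
--         return "Disney+"
-- ===== SOURCE B (Python) =====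
-- def most_streaming_service(table, headers):
--     services = ["Netflix", "Hulu", "Prime Video", "Disney+"]
--     counts = [0, 0, 0, 0]
--     for row in table:
--         vals = [row[headers.index(s)] for s in services]
--         if "" not in vals:
--             for k in range(4):
--                 if vals[k] == "1":
--                     counts[k] += 1
--     best = 0
--     for k in range(1, 4):
--         if counts[k] > counts[best]:
--             best = k
--     return services[best]
-- ===== Notes on version B (the rewrite author's own statement) =====
-- stated objective: simpler
-- what changed: B replaces A's four intermediate filtered-table passes plus a separate counting pass by one loop over the original table that guards each row on all four service columns being non-empty and increments four counters, and replaces the chained max-equality return by a first-strict-max index scan.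
-- outside the precondition, e.g. on most_streaming_service([['']], ['Netflix', 'Hulu', 'Prime Video', 'Disney+']): A returns 'Netflix', B raises IndexError
import Mathlib
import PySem

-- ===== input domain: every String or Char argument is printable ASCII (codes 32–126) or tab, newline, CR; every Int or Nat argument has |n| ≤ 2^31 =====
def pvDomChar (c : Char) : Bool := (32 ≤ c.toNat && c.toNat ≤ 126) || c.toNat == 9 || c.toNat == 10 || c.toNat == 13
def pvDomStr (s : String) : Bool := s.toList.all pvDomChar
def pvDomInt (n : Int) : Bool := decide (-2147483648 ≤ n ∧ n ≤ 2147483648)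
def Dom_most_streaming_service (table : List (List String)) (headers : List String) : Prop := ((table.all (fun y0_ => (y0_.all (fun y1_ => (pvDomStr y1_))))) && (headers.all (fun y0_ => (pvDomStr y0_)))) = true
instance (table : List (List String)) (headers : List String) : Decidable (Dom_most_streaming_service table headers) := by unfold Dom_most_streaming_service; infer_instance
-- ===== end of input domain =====

-- B fuses A's four filtered-table passes plus counting pass into one guarded loop with four
-- counters, and replaces the chained-max return by a first-strict-max scan (objective: simpler).

-- shared helper: row[headers.index(col)] as a total function ("" when the lookup would raise;
-- inside Pre_ the lookup never raises)
def pvLookup (headers row : List String) (col : String) : String :=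
  ((PySem.List.index? headers col).bind (fun i => PySem.List.pyGet? row (i : Int))).getD ""

-- ===== PORT A =====
def pvRemoveMissing (table : List (List String)) (header : List String) (col : String) : List (List String) :=
  match table with
  | [] => []
  | row :: rest =>
    if pvLookup header row col ≠ "" then row :: pvRemoveMissing rest header col
    else pvRemoveMissing rest header col

def pvCountStep (headers : List String) (c : Int × Int × Int × Int) (row : List String) :
    Int × Int × Int × Int :=
  let c := if pvLookup headers row "Netflix" = "1" then (c.1 + 1, c.2) else c
  let c := if pvLookup headers row "Hulu" = "1" then (c.1, c.2.1 + 1, c.2.2) else c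
  let c := if pvLookup headers row "Prime Video" = "1" then (c.1, c.2.1, c.2.2.1 + 1, c.2.2.2) else c
  if pvLookup headers row "Disney+" = "1" then (c.1, c.2.1, c.2.2.1, c.2.2.2 + 1) else c

def most_streaming_service (table : List (List String)) (headers : List String) : String :=
  let t1 := pvRemoveMissing table headers "Netflix"
  let t2 := pvRemoveMissing t1 headers "Hulu"
  let t3 := pvRemoveMissing t2 headers "Prime Video"
  let t4 := pvRemoveMissing t3 headers "Disney+"
  let c := t4.foldl (pvCountStep headers) (0, 0, 0, 0)
  let m := max (max (max c.1 c.2.1) c.2.2.1) c.2.2.2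
  if m = c.1 then "Netflix"
  else if m = c.2.1 then "Hulu"
  else if m = c.2.2.1 then "Prime Video"
  else "Disney+"

-- ===== PORT B =====
def pvAltStep (headers : List String) (c : Int × Int × Int × Int) (row : List String) :
    Int × Int × Int × Int :=
  let n := pvLookup headers row "Netflix"
  let h := pvLookup headers row "Hulu"
  let p := pvLookup headers row "Prime Video"
  let d := pvLookup headers row "Disney+"
  if n ≠ "" ∧ h ≠ "" ∧ p ≠ "" ∧ d ≠ "" then
    (c.1 + (if n = "1" then 1 else 0), c.2.1 + (if h = "1" then 1 else 0),
     c.2.2.1 + (if p = "1" then 1 else 0), c.2.2.2 + (if d = "1" then 1 else 0))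
  else c

def most_streaming_service_alt (table : List (List String)) (headers : List String) : String :=
  let c := table.foldl (pvAltStep headers) (0, 0, 0, 0)
  let b : Nat × Int := (0, c.1)
  let b := if c.2.1 > b.2 then (1, c.2.1) else b
  let b := if c.2.2.1 > b.2 then (2, c.2.2.1) else b
  let b := if c.2.2.2 > b.2 then (3, c.2.2.2) else b
  (["Netflix", "Hulu", "Prime Video", "Disney+"].getD b.1 "")

-- ===== PRECONDITION & SPEC =====
-- Pre_ excludes tables containing a row too short for some service column (and non-empty tables
-- whose headers lack one of the four service labels): B raises IndexError on every such input,
-- and A raises IndexError/ValueError on them too unless an earlier filter drops the offending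
-- row first (Pre_ also excludes that early-dropped short-row case, where A returns but B raises).
def Pre_most_streaming_service (table : List (List String)) (headers : List String) : Prop :=
  table = [] ∨
    (["Netflix", "Hulu", "Prime Video", "Disney+"].all (fun s =>
      decide (s ∈ headers) &&
        table.all (fun row => decide (headers.idxOf s < row.length))) = true)
instance (table : List (List String)) (headers : List String) :
    Decidable (Pre_most_streaming_service table headers) := by
  unfold Pre_most_streaming_service; infer_instance

def pvWitness_most_streaming_service : List (List String) × List String :=
  ([["1", "", "1", "1"], ["1", "1", "0", "1"]], ["Netflix", "Hulu", "Prime Video", "Disney+"])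

def Spec_most_streaming_service (table : List (List String)) (headers : List String) (out : String) : Prop := out = most_streaming_service_alt table headers
instance (table : List (List String)) (headers : List String) (out : String) : Decidable (Spec_most_streaming_service table headers out) := by unfold Spec_most_streaming_service; infer_instance

-- ===== CLAIM (what is proved, stated in full; the proofs are below) =====
def Claim_equal_most_streaming_service : Prop := ∀ (table : List (List String)) (headers : List String), Dom_most_streaming_service table headers → Pre_most_streaming_service table headers → Spec_most_streaming_service table headers (most_streaming_service table headers)

-- ===== LEMMAS AND PROOFS =====

-- B's step does nothing on a row failing one of the four non-empty filters
theorem altStep_of_missing (headers : List String) (c : Int × Int × Int × Int)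
    (row : List String)
    (h : pvLookup headers row "Netflix" = "" ∨ pvLookup headers row "Hulu" = "" ∨
         pvLookup headers row "Prime Video" = "" ∨ pvLookup headers row "Disney+" = "") :
    pvAltStep headers c row = c := by
  unfold pvAltStep
  rcases h with h | h | h | h <;> simp [h]

-- on a row passing all four filters, B's step is A's counting step
theorem altStep_of_present (headers : List String) (c : Int × Int × Int × Int)
    (row : List String)
    (hn : pvLookup headers row "Netflix" ≠ "") (hh : pvLookup headers row "Hulu" ≠ "")
    (hp : pvLookup headers row "Prime Video" ≠ "") (hd : pvLookup headers row "Disney+" ≠ "") :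
    pvAltStep headers c row = pvCountStep headers c row := by
  unfold pvAltStep pvCountStep
  simp only [hn, hh, hp, hd, and_self, if_true, ne_eq, not_false_iff]
  split_ifs <;> simp_all

-- the four filter passes followed by the counting fold equal B's single guarded fold
theorem counts_eq (headers : List String) (table : List (List String)) (init : Int × Int × Int × Int) :
    (pvRemoveMissing (pvRemoveMissing (pvRemoveMissing
        (pvRemoveMissing table headers "Netflix") headers "Hulu")
        headers "Prime Video") headers "Disney+").foldl (pvCountStep headers) init
      = table.foldl (pvAltStep headers) init := by
  induction table generalizing init with
  | nil => rfl
  | cons row rest ih =>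
    by_cases hn : pvLookup headers row "Netflix" = "" <;>
    by_cases hh : pvLookup headers row "Hulu" = "" <;>
    by_cases hp : pvLookup headers row "Prime Video" = "" <;>
    by_cases hd : pvLookup headers row "Disney+" = "" <;>
      simp only [pvRemoveMissing, hn, hh, hp, hd, ne_eq, not_true, not_false_iff,
        if_true, if_false, List.foldl_cons, ih] <;>
      first
        | rw [altStep_of_present headers init row hn hh hp hd]
        | rw [altStep_of_missing headers init row (by tauto)]

-- A's chained-max selection equals B's first-strict-max scan, for any counts
theorem select_eq (n h p d : Int) :
    (if max (max (max n h) p) d = n then "Netflix"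
     else if max (max (max n h) p) d = h then "Hulu"
     else if max (max (max n h) p) d = p then "Prime Video"
     else "Disney+")
    = (let b : Nat × Int := (0, n)
       let b := if h > b.2 then (1, h) else b
       let b := if p > b.2 then (2, p) else b
       let b := if d > b.2 then (3, d) else b
       (["Netflix", "Hulu", "Prime Video", "Disney+"].getD b.1 "")) := by
  dsimp only
  split_ifs <;> first | rfl | (exfalso; omega)

-- ===== VERDICT (by name: the statement is the Claim_ definition above) =====
theorem most_streaming_service_spec : Claim_equal_most_streaming_service := by
  intro table headers _ _
  show most_streaming_service table headers = most_streaming_service_alt table headers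
  simp only [most_streaming_service, most_streaming_service_alt,
    counts_eq headers table (0, 0, 0, 0)]
  exact select_eq _ _ _ _
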